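-- pv_equiv track=rewrite | github.com/svdrecbd/Scion | workers/ingestion/public_data_pilot.py | classify_asset_warnings
-- ===== SOURCE A (Python) =====
-- from typing import Any
--
-- def classify_asset_warnings(warnings: list[str], normalized_asset: dict[str, Any]) -> tuple[list[str], list[str]]:
--     blockers: list[str] = []
--     review_notes: list[str] = []
--     physical_source = str((normalized_asset.get("physical_voxel_size_nm") or {}).get("source") or "")
--     for warning in warnings:
--         if warning == "mrc_header_physical_scale_likely_default" and physical_source in {"asset_api_details", "citation_details"}:
--             review_notes.append(warning)
--         else:
--             blockers.append(warning)
--     return sorted(set(blockers)), sorted(set(review_notes))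
-- ===== SOURCE B (Python) =====
-- def classify_asset_warnings(warnings, normalized_asset):
--     physical_source = str((normalized_asset.get("physical_voxel_size_nm") or {}).get("source") or "")
--     note = "mrc_header_physical_scale_likely_default"
--     blockers = sorted(set(warnings))
--     if physical_source in ("asset_api_details", "citation_details") and note in blockers:
--         blockers.remove(note)
--         return blockers, [note]
--     return blockers, []
-- ===== Notes on version B (the rewrite author's own statement) =====
-- stated objective: simpler
-- what changed: Instead of classifying each warning in a loop and then sorting/deduplicating the two groups separately, B sorts and deduplicates the whole warning list once and then conditionally extracts the single possible review-note string from the sorted result.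
import Mathlib
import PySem

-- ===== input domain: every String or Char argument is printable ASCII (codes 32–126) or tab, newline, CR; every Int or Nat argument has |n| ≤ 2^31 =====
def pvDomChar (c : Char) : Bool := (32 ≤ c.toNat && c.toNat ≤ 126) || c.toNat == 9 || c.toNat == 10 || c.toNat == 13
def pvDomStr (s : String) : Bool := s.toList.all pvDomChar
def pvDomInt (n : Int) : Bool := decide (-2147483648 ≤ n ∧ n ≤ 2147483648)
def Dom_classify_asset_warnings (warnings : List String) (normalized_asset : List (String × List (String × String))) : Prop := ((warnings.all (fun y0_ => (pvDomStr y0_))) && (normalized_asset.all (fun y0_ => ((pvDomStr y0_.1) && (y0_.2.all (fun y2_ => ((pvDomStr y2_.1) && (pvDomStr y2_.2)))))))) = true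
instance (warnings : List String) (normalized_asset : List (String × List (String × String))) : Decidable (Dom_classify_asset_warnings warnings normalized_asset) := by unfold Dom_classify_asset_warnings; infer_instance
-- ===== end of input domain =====

-- B sorts/dedups the whole warning list once and then conditionally removes the single possible review-note string, instead of A's per-element classification loop followed by two sort+dedup passes (objective: simpler).


-- shared helper: physical_source = str((normalized_asset.get("physical_voxel_size_nm") or {}).get("source") or "")
-- 'x or {}' on an Option of a dict: none/empty → {}; 'y or ""' on an Option String: none/"" → "" — both are exactly getD
def pvPhysicalSource (normalized_asset : List (String × List (String × String))) : String :=
  let inner := (PySem.Dict.mk normalized_asset).getD "physical_voxel_size_nm" []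
  (PySem.Dict.mk inner).getD "source" ""

-- ===== PORT A =====
def classify_asset_warnings (warnings : List String) (normalized_asset : List (String × List (String × String))) : List String × List String :=
  let physical_source := pvPhysicalSource normalized_asset
  let acc := warnings.foldl (fun (acc : List String × List String) warning =>
      if warning = "mrc_header_physical_scale_likely_default" ∧
         (physical_source = "asset_api_details" ∨ physical_source = "citation_details") then
        (acc.1, acc.2 ++ [warning])
      else
        (acc.1 ++ [warning], acc.2)) ([], [])
  (PySem.List.sorted (PySem.Set.ofList acc.1) (fun x => x) false,
   PySem.List.sorted (PySem.Set.ofList acc.2) (fun x => x) false)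

-- ===== PORT B =====
def classify_asset_warnings_alt (warnings : List String) (normalized_asset : List (String × List (String × String))) : List String × List String :=
  let physical_source := pvPhysicalSource normalized_asset
  let note := "mrc_header_physical_scale_likely_default"
  let blockers := PySem.List.sorted (PySem.Set.ofList warnings) (fun x => x) false
  if (physical_source = "asset_api_details" ∨ physical_source = "citation_details") ∧ note ∈ blockers then
    -- blockers.remove(note): the guard guarantees note ∈ blockers, so remove? is some and the getD default is unreachable
    ((PySem.List.remove? blockers note).getD blockers, [note])
  else
    (blockers, [])

-- ===== PRECONDITION & SPEC =====
def Spec_classify_asset_warnings (warnings : List String) (normalized_asset : List (String × List (String × String))) (out : List String × List String) : Prop := out = classify_asset_warnings_alt warnings normalized_asset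
instance (warnings : List String) (normalized_asset : List (String × List (String × String))) (out : List String × List String) : Decidable (Spec_classify_asset_warnings warnings normalized_asset out) := by unfold Spec_classify_asset_warnings; infer_instance

-- ===== CLAIM (what is proved, stated in full; the proofs are below) =====
def Claim_equal_classify_asset_warnings : Prop := ∀ (warnings : List String) (normalized_asset : List (String × List (String × String))), Dom_classify_asset_warnings warnings normalized_asset → Spec_classify_asset_warnings warnings normalized_asset (classify_asset_warnings warnings normalized_asset)

-- ===== LEMMAS AND PROOFS =====

-- A's two-accumulator loop is a pair of filters (specific to A's loop shape)
theorem pvFoldl_filter (p : String → Prop) [DecidablePred p] (ws b r : List String) :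
    ws.foldl (fun (acc : List String × List String) w =>
        if p w then (acc.1, acc.2 ++ [w]) else (acc.1 ++ [w], acc.2)) (b, r)
      = (b ++ ws.filter (fun w => decide ¬ p w), r ++ ws.filter (fun w => decide (p w))) := by
  induction ws generalizing b r with
  | nil => simp
  | cons w ws ih =>
    by_cases h : p w <;> simp [h, ih]

-- ===== VERDICT (by name: the statement is the Claim_ definition above) =====
theorem classify_asset_warnings_spec : Claim_equal_classify_asset_warnings := by
  intro warnings normalized_asset _
  show _ = _
  simp only [classify_asset_warnings, classify_asset_warnings_alt]
  set src := pvPhysicalSource normalized_asset with hsrc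
  set note := "mrc_header_physical_scale_likely_default" with hnote
  rw [pvFoldl_filter (fun w => w = note ∧ (src = "asset_api_details" ∨ src = "citation_details")) warnings [] []]
  simp only [List.nil_append]
  by_cases hc : (src = "asset_api_details" ∨ src = "citation_details")
  · by_cases hm : note ∈ warnings
    · -- guard fires in B
      have hmb : note ∈ PySem.List.sorted (PySem.Set.ofList warnings) (fun x => x) false := by
        rw [PySem.List.mem_sorted, PySem.Set.mem_ofList]; exact hm
      rw [if_pos ⟨hc, hmb⟩]
      have hblt := PySem.List.sorted_ofList_pairwise_lt (xs := warnings)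
      have hbnd : (PySem.List.sorted (PySem.Set.ofList warnings) (fun x => x) false).Nodup :=
        hblt.imp (fun h => ne_of_lt h)
      rw [PySem.List.remove?_eq_some_erase (xs := PySem.List.sorted (PySem.Set.ofList warnings) (fun x => x) false) (v := note) hmb, Option.getD_some]
      refine Prod.ext ?_ ?_
      · -- blockers: A's sorted deduped "≠ note" filter = B's erase from the sorted deduped whole list
        refine PySem.List.sorted_eq_of_perm_of_pairwise_lt _ _ _
          ((List.perm_ext_iff_of_nodup ((hbnd.erase note)) (PySem.Set.nodup_ofList _)).2 ?_)
          (hblt.sublist List.erase_sublist)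
        intro a
        rw [hbnd.mem_erase_iff, PySem.List.mem_sorted, PySem.Set.mem_ofList,
          PySem.Set.mem_ofList, List.mem_filter]
        constructor
        · rintro ⟨hne, ha⟩
          exact ⟨ha, by simp [hne, hc]⟩
        · rintro ⟨ha, hd⟩
          simp only [decide_eq_true_eq] at hd
          exact ⟨fun he => hd ⟨he, hc⟩, ha⟩
      · -- review notes: A's sorted deduped "= note" filter = [note]
        -- prove via perm with the singleton
        have hperm : (PySem.Set.ofList (warnings.filter
            (fun w => decide (w = note ∧ (src = "asset_api_details" ∨ src = "citation_details"))))).Perm [note] := by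
          refine (List.perm_ext_iff_of_nodup (PySem.Set.nodup_ofList _) (List.nodup_singleton _)).2 ?_
          intro a
          rw [PySem.Set.mem_ofList, List.mem_filter, List.mem_singleton]
          constructor
          · rintro ⟨_, hd⟩
            simp only [decide_eq_true_eq] at hd
            exact hd.1
          · rintro rfl
            exact ⟨hm, by simp [hc]⟩
        rw [List.perm_singleton.mp hperm]
        rfl
    · -- note absent: guard off in B, A's filter keeps everything
      have hmb : note ∉ PySem.List.sorted (PySem.Set.ofList warnings) (fun x => x) false := by
        rw [PySem.List.mem_sorted, PySem.Set.mem_ofList]; exact hm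
      rw [if_neg (fun h => hmb h.2)]
      have h1 : warnings.filter (fun w => decide ¬ (w = note ∧ (src = "asset_api_details" ∨ src = "citation_details"))) = warnings := by
        apply List.filter_eq_self.2
        intro a ha
        simp only [decide_eq_true_eq]
        exact fun h => hm (h.1 ▸ ha)
      have h2 : warnings.filter (fun w => decide (w = note ∧ (src = "asset_api_details" ∨ src = "citation_details"))) = [] := by
        apply List.filter_eq_nil_iff.2
        intro a ha
        simp only [decide_eq_true_eq]
        exact fun h => hm (h.1 ▸ ha)
      rw [h1, h2]
      rfl
  · -- source not privileged: guard off in B, A's filter keeps everything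
    rw [if_neg (fun h => hc h.1)]
    have h1 : warnings.filter (fun w => decide ¬ (w = note ∧ (src = "asset_api_details" ∨ src = "citation_details"))) = warnings := by
      apply List.filter_eq_self.2
      intro a _
      simp only [decide_eq_true_eq]
      exact fun h => hc h.2
    have h2 : warnings.filter (fun w => decide (w = note ∧ (src = "asset_api_details" ∨ src = "citation_details"))) = [] := by
      apply List.filter_eq_nil_iff.2
      intro a _
      simp only [decide_eq_true_eq]
      exact fun h => hc h.2
    rw [h1, h2]
    rfl
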